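-- pv_equiv track=rewrite | github.com/chenyaofo/DSM-NAS | codebase/core/dynamic_graph.py | _create_edge
-- ===== SOURCE A (Python) =====
-- import itertools
--
-- def _create_edge(n_nodes, perfs):
--     edge_index = []
--     for i, j in itertools.product(range(n_nodes), range(n_nodes)):
--         if i == j:
--             continue
--         else:
--             if perfs[i] <= perfs[j]:
--                 if (j, i) not in edge_index:
--                     edge_index.append((i, j))
--     return edge_index
-- ===== SOURCE B (Python) =====
-- def _create_edge(n_nodes, perfs):
--     # Same row-major pair order, but the "(j, i) not in edge_index" scan is
--     # replaced by the equivalent arithmetic rule, so no accumulator is queried.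
--     edge_index = []
--     for i in range(n_nodes):
--         for j in range(n_nodes):
--             if i < j:
--                 if perfs[i] <= perfs[j]:
--                     edge_index.append((i, j))
--             elif j < i:
--                 if perfs[i] < perfs[j]:
--                     edge_index.append((i, j))
--     return edge_index
-- ===== Notes on version B (the rewrite author's own statement) =====
-- stated objective: alternative
-- what changed: The '(j, i) not in edge_index' scan over the growing accumulator is replaced by the equivalent arithmetic rule on the pair ((i<j and perfs[i]<=perfs[j]) or (i>j and perfs[i]<perfs[j])), so no accumulator is ever queried.
import Mathlib
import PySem

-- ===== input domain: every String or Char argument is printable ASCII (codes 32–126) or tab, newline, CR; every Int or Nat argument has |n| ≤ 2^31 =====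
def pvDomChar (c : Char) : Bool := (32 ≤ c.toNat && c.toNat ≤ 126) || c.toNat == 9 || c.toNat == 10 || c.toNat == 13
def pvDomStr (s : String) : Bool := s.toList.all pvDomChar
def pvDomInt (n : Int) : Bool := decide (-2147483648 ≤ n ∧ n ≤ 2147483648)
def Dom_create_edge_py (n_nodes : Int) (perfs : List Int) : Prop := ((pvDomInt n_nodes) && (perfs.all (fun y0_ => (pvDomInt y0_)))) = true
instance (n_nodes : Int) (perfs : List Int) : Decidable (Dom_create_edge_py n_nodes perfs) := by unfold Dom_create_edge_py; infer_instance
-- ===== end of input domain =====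

-- B drops A's '(j, i) not in edge_index' accumulator scan in favour of the equivalent
-- arithmetic condition on the pair, keeping the exact row-major append order.

-- ===== PORT A =====
-- perfs[i] on Pre_ is always in range; pyGetD with default 0 is exact there.
def create_edge_py (n_nodes : Int) (perfs : List Int) : List (Int × Int) :=
  ((PySem.List.pyRange 0 n_nodes 1).flatMap
      (fun i => (PySem.List.pyRange 0 n_nodes 1).map (fun j => (i, j)))).foldl
    (fun acc q =>
      if q.1 = q.2 then acc
      else if PySem.List.pyGetD perfs q.1 0 ≤ PySem.List.pyGetD perfs q.2 0 then
        (if (q.2, q.1) ∈ acc then acc else acc ++ [q])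
      else acc) []

-- ===== PORT B =====
def create_edge_py_alt (n_nodes : Int) (perfs : List Int) : List (Int × Int) :=
  (PySem.List.pyRange 0 n_nodes 1).foldl
    (fun acc i =>
      (PySem.List.pyRange 0 n_nodes 1).foldl
        (fun acc2 j =>
          if i < j then
            (if PySem.List.pyGetD perfs i 0 ≤ PySem.List.pyGetD perfs j 0 then acc2 ++ [(i, j)] else acc2)
          else if j < i then
            (if PySem.List.pyGetD perfs i 0 < PySem.List.pyGetD perfs j 0 then acc2 ++ [(i, j)] else acc2)
          else acc2) acc) []

-- ===== PRECONDITION & SPEC =====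
-- Pre_ excludes exactly the inputs where the Python A raises IndexError (perfs[i] for some
-- 0 ≤ i < n_nodes with i ≥ len(perfs); no index is touched when n_nodes ≤ 1).  B raises there too.
def Pre_create_edge_py (n_nodes : Int) (perfs : List Int) : Prop :=
  n_nodes ≤ (perfs.length : Int) ∨ n_nodes ≤ 1
instance (n_nodes : Int) (perfs : List Int) : Decidable (Pre_create_edge_py n_nodes perfs) := by
  unfold Pre_create_edge_py; infer_instance

def pvWitness_create_edge_py : Int × List Int := (3, [5, 2, 5])

def Spec_create_edge_py (n_nodes : Int) (perfs : List Int) (out : List (Int × Int)) : Prop := out = create_edge_py_alt n_nodes perfs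
instance (n_nodes : Int) (perfs : List Int) (out : List (Int × Int)) : Decidable (Spec_create_edge_py n_nodes perfs out) := by unfold Spec_create_edge_py; infer_instance

-- ===== CLAIM (what is proved, stated in full; the proofs are below) =====
def Claim_equal_create_edge_py : Prop := ∀ (n_nodes : Int) (perfs : List Int), Dom_create_edge_py n_nodes perfs → Pre_create_edge_py n_nodes perfs → Spec_create_edge_py n_nodes perfs (create_edge_py n_nodes perfs)

-- ===== LEMMAS AND PROOFS =====

-- p k = perfs[k] (with the port's default)
def pvP (perfs : List Int) (k : Int) : Int := PySem.List.pyGetD perfs k 0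

-- the arithmetic edge condition of B
abbrev pvCond (p : Int → Int) (q : Int × Int) : Prop :=
  (q.1 < q.2 ∧ p q.1 ≤ p q.2) ∨ (q.2 < q.1 ∧ p q.1 < p q.2)

def pvCb (p : Int → Int) (q : Int × Int) : Bool := decide (pvCond p q)

-- A's loop body
def pvStepA (p : Int → Int) (acc : List (Int × Int)) (q : Int × Int) : List (Int × Int) :=
  if q.1 = q.2 then acc
  else if p q.1 ≤ p q.2 then (if (q.2, q.1) ∈ acc then acc else acc ++ [q])
  else acc

-- the row-major pair list
def pvPairs (n : Int) : List (Int × Int) :=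
  (PySem.List.pyRange 0 n 1).flatMap
    (fun i => (PySem.List.pyRange 0 n 1).map (fun j => (i, j)))

-- strict lexicographic order on pairs
def pvLex (a b : Int × Int) : Prop := a.1 < b.1 ∨ (a.1 = b.1 ∧ a.2 < b.2)

lemma pvFlatMap_pairwise (l rng : List Int) (hl : l.Pairwise (· < ·))
    (hr : rng.Pairwise (· < ·)) :
    (l.flatMap (fun i => rng.map (fun j => (i, j)))).Pairwise pvLex := by
  induction l with
  | nil => simp
  | cons a t ih =>
    rw [List.flatMap_cons]
    rw [List.pairwise_append]
    refine ⟨?_, ih hl.of_cons, ?_⟩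
    · exact hr.map _ (fun {x y} hxy => Or.inr ⟨rfl, hxy⟩)
    · intro x hx y hy
      obtain ⟨j, hj, hxe⟩ := List.mem_map.1 hx
      obtain ⟨b, hb, hy2⟩ := List.mem_flatMap.1 hy
      obtain ⟨j', hj', hye⟩ := List.mem_map.1 hy2
      subst hxe; subst hye
      exact Or.inl (List.rel_of_pairwise_cons hl hb)

lemma pvMem_pairs (n : Int) (q : Int × Int) :
    q ∈ pvPairs n ↔ q.1 ∈ PySem.List.pyRange 0 n 1 ∧ q.2 ∈ PySem.List.pyRange 0 n 1 := by
  unfold pvPairs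
  constructor
  · intro h
    obtain ⟨i, hi, h2⟩ := List.mem_flatMap.1 h
    obtain ⟨j, hj, he⟩ := List.mem_map.1 h2
    subst he
    exact ⟨hi, hj⟩
  · intro ⟨h1, h2⟩
    exact List.mem_flatMap.2 ⟨q.1, h1, List.mem_map.2 ⟨q.2, h2, rfl⟩⟩

lemma pvPairs_pairwise (n : Int) : (pvPairs n).Pairwise pvLex :=
  pvFlatMap_pairwise _ _ (PySem.List.pairwise_lt_pyRange_one 0 n)
    (PySem.List.pairwise_lt_pyRange_one 0 n)

-- the key order fact: at the moment A processes (i, j), the pair (j, i) has been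
-- processed before it iff j < i
lemma pvSplit_mem (n : Int) (P1 P2 : List (Int × Int)) (q : Int × Int)
    (hsplit : pvPairs n = P1 ++ q :: P2) (hne : q.1 ≠ q.2) :
    ((q.2, q.1) ∈ P1 ↔ q.2 < q.1) := by
  have hpw : (P1 ++ q :: P2).Pairwise pvLex := hsplit ▸ pvPairs_pairwise n
  rw [List.pairwise_append] at hpw
  obtain ⟨h1, h2, hcross⟩ := hpw
  constructor
  · intro hmem
    have := hcross _ hmem q (List.mem_cons_self ..)
    rcases this with h | ⟨h, h'⟩
    · exact h
    · exact absurd h.symm hne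
  · intro hlt
    have hq : q ∈ pvPairs n := hsplit ▸ List.mem_append_right _ (List.mem_cons_self ..)
    have hq' : (q.2, q.1) ∈ pvPairs n := by
      rw [pvMem_pairs] at hq ⊢
      exact ⟨hq.2, hq.1⟩
    rw [hsplit, List.mem_append, List.mem_cons] at hq'
    rcases hq' with h | h | h
    · exact h
    · exact absurd (congrArg Prod.fst h) (by simpa using ne_of_lt hlt)
    · rcases List.rel_of_pairwise_cons h2 h with hle | ⟨heq, _⟩
      · exact absurd hle (by omega)
      · exact absurd heq (by simpa using hne)

-- main invariant: A's fold produces the filter by pvCond, in traversal order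
lemma pvFold_filter (p : Int → Int) :
    ∀ (P pre : List (Int × Int)),
      (∀ (P1 : List (Int × Int)) (q : Int × Int) (P2 : List (Int × Int)),
          P = P1 ++ q :: P2 → q.1 ≠ q.2 → ((q.2, q.1) ∈ pre ++ P1 ↔ q.2 < q.1)) →
      P.foldl (pvStepA p) (pre.filter (pvCb p)) = (pre ++ P).filter (pvCb p) := by
  intro P
  induction P with
  | nil => intro pre _; simp
  | cons q P' ih =>
    intro pre H
    have hstep : pvStepA p (pre.filter (pvCb p)) q = (pre ++ [q]).filter (pvCb p) := by
      rw [List.filter_append]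
      unfold pvStepA
      by_cases hne : q.1 = q.2
      · have hcb : pvCb p q = false := by
          simp [pvCb, pvCond]; omega
        simp [hne, hcb]
      · have hmem0 := H [] q P' (by simp) hne
        simp only [List.append_nil] at hmem0
        have hmemf : ((q.2, q.1) ∈ pre.filter (pvCb p)) ↔ (q.2 < q.1 ∧ p q.2 ≤ p q.1) := by
          rw [List.mem_filter, hmem0]
          simp only [pvCb, pvCond, decide_eq_true_eq]
          constructor
          · rintro ⟨h, hc | hc⟩
            · exact ⟨h, hc.2⟩
            · exact absurd hc.1 (by omega)
          · rintro ⟨h, hle⟩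
            exact ⟨h, Or.inl ⟨h, hle⟩⟩
        by_cases hc : pvCb p q = true
        · -- edge is appended
          have hnm : ¬ ((q.2, q.1) ∈ pre.filter (pvCb p)) := by
            rw [hmemf]
            simp only [pvCb, pvCond, decide_eq_true_eq] at hc
            rcases hc with h | h <;> omega
          have hle : p q.1 ≤ p q.2 := by
            simp only [pvCb, pvCond, decide_eq_true_eq] at hc
            rcases hc with h | h
            · exact h.2
            · exact le_of_lt h.2
          simp [hne, hle, hnm, hc]
        · have hc' : pvCb p q = false := by simpa using hc
          have hcond : ¬ pvCond p q := by simpa [pvCb] using hc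
          by_cases hle : p q.1 ≤ p q.2
          · have hm : (q.2, q.1) ∈ pre.filter (pvCb p) := by
              rw [hmemf]
              simp only [pvCond] at hcond
              constructor <;> omega
            simp [hne, hle, hm, hc']
          · simp [hne, hle, hc']
    rw [List.foldl_cons, hstep]
    have H' : ∀ (P1 : List (Int × Int)) (q' : Int × Int) (P2 : List (Int × Int)),
        P' = P1 ++ q' :: P2 → q'.1 ≠ q'.2 → ((q'.2, q'.1) ∈ (pre ++ [q]) ++ P1 ↔ q'.2 < q'.1) := by
      intro P1 q' P2 hs hne'
      have := H (q :: P1) q' P2 (by simp [hs]) hne'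
      simpa using this
    have := ih (pre ++ [q]) H'
    simpa using this

-- A's port in helper form
lemma pvA_eq (n_nodes : Int) (perfs : List Int) :
    create_edge_py n_nodes perfs = (pvPairs n_nodes).foldl (pvStepA (pvP perfs)) [] := rfl

-- B's inner loop in single-test form
lemma pvStepB_eq (perfs : List Int) (i : Int) :
    (fun (acc2 : List (Int × Int)) (j : Int) =>
        if i < j then
          (if PySem.List.pyGetD perfs i 0 ≤ PySem.List.pyGetD perfs j 0 then acc2 ++ [(i, j)] else acc2)
        else if j < i then
          (if PySem.List.pyGetD perfs i 0 < PySem.List.pyGetD perfs j 0 then acc2 ++ [(i, j)] else acc2)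
        else acc2)
      = (fun acc2 j => if pvCb (pvP perfs) (i, j) then acc2 ++ [(i, j)] else acc2) := by
  funext acc2 j
  simp only [pvCb, pvCond, pvP]
  split_ifs with h1 h2 h3 h4 h5 h6 h7 h8 <;>
    first
      | rfl
      | (exfalso; simp only [decide_eq_true_eq] at *; omega)

lemma pvFilter_flatMap {A B : Type} (p : B → Bool) (g : A → List B) (l : List A) :
    (l.flatMap g).filter p = l.flatMap (fun a => (g a).filter p) := by
  induction l with
  | nil => simp
  | cons a t ih => simp [List.flatMap_cons, List.filter_append, ih]

-- B's port equals the filtered pair list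
lemma pvB_eq (n_nodes : Int) (perfs : List Int) :
    create_edge_py_alt n_nodes perfs = (pvPairs n_nodes).filter (pvCb (pvP perfs)) := by
  unfold create_edge_py_alt pvPairs
  have hinner : ∀ (acc : List (Int × Int)) (i : Int),
      (PySem.List.pyRange 0 n_nodes 1).foldl
          (fun acc2 j =>
            if i < j then
              (if PySem.List.pyGetD perfs i 0 ≤ PySem.List.pyGetD perfs j 0 then acc2 ++ [(i, j)] else acc2)
            else if j < i then
              (if PySem.List.pyGetD perfs i 0 < PySem.List.pyGetD perfs j 0 then acc2 ++ [(i, j)] else acc2)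
            else acc2) acc
        = acc ++ ((PySem.List.pyRange 0 n_nodes 1).map (fun j => (i, j))).filter (pvCb (pvP perfs)) := by
    intro acc i
    rw [pvStepB_eq perfs i]
    rw [PySem.List.foldl_append_if (fun j => pvCb (pvP perfs) (i, j)) (fun j => (i, j))]
    rw [List.filter_map]
    rfl
  calc (PySem.List.pyRange 0 n_nodes 1).foldl
        (fun acc i =>
          (PySem.List.pyRange 0 n_nodes 1).foldl
            (fun acc2 j =>
              if i < j then
                (if PySem.List.pyGetD perfs i 0 ≤ PySem.List.pyGetD perfs j 0 then acc2 ++ [(i, j)] else acc2)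
              else if j < i then
                (if PySem.List.pyGetD perfs i 0 < PySem.List.pyGetD perfs j 0 then acc2 ++ [(i, j)] else acc2)
              else acc2) acc) []
      = (PySem.List.pyRange 0 n_nodes 1).foldl
        (fun acc i => acc ++ ((PySem.List.pyRange 0 n_nodes 1).map (fun j => (i, j))).filter (pvCb (pvP perfs))) [] := by
        apply PySem.List.foldl_congr_mem
        intro acc i _
        exact hinner acc i
    _ = ((PySem.List.pyRange 0 n_nodes 1).flatMap
          (fun i => ((PySem.List.pyRange 0 n_nodes 1).map (fun j => (i, j))).filter (pvCb (pvP perfs)))) := by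
        rw [PySem.List.foldl_append_eq_flatMap]
        simp
    _ = ((PySem.List.pyRange 0 n_nodes 1).flatMap
          (fun i => (PySem.List.pyRange 0 n_nodes 1).map (fun j => (i, j)))).filter (pvCb (pvP perfs)) := by
        rw [pvFilter_flatMap]

-- ===== VERDICT (by name: the statement is the Claim_ definition above) =====
theorem create_edge_py_spec : Claim_equal_create_edge_py := by
  intro n_nodes perfs _ _
  unfold Spec_create_edge_py
  rw [pvA_eq, pvB_eq]
  have := pvFold_filter (pvP perfs) (pvPairs n_nodes) []
    (by
      intro P1 q P2 hs hne
      simpa using pvSplit_mem n_nodes P1 P2 q hs hne)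
  simpa using this
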